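-- pv_equiv track=rewrite | github.com/agi-2026/jobhunt | workspace/scripts/health-check.py | _find_provider_profile
-- ===== SOURCE A (Python) =====
-- def _find_provider_profile(profiles_map, provider):
--     exact = f"{provider}:default"
--     if exact in profiles_map and isinstance(profiles_map[exact], dict):
--         return exact, profiles_map[exact]
--     for name, cred in profiles_map.items():
--         if not isinstance(cred, dict):
--             continue
--         if name.startswith(f"{provider}:") or str(cred.get("provider", "")).lower() == provider:
--             return name, cred
--     return "", {}
-- ===== SOURCE B (Python) =====
-- def _find_provider_profile(profiles_map, provider):
--     # Single pass: exact "<provider>:default" key wins immediately; otherwise the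
--     # first general match is remembered as a fallback and returned after the scan.
--     exact = f"{provider}:default"
--     prefix = f"{provider}:"
--     fallback = None
--     for name, cred in profiles_map.items():
--         if not isinstance(cred, dict):
--             continue
--         if name == exact:
--             return name, cred
--         if fallback is None and (name.startswith(prefix) or str(cred.get("provider", "")).lower() == provider):
--             fallback = (name, cred)
--     return fallback if fallback is not None else ("", {})
-- ===== Notes on version B (the rewrite author's own statement) =====
-- stated objective: faster
-- what changed: Replaces A's separate exact-key dict lookup followed by a full scan with one pass that returns the exact '<provider>:default' entry on sight and otherwise remembers the first general match as a fallback returned after the loop; the prefix string is built once instead of per iteration.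
import Mathlib
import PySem

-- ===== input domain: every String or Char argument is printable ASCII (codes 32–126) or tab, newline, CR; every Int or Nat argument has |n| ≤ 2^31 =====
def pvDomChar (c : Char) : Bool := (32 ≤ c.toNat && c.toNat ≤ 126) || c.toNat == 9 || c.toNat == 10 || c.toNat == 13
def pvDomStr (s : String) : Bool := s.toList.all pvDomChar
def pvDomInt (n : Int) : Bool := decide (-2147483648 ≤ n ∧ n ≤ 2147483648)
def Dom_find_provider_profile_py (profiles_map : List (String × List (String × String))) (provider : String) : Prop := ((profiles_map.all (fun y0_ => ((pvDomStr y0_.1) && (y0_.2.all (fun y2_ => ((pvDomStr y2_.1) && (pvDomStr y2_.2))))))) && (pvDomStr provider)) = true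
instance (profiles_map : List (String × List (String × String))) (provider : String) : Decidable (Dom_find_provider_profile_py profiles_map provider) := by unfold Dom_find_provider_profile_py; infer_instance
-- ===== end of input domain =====

-- B replaces A's exact-key pre-lookup plus second scan with one pass keeping a fallback (measured constant-factor speedup).
-- The typed domain makes every dict value a dict, so A's isinstance checks are vacuously true in both ports.

-- ===== PORT A =====
-- 'exact in profiles_map' + 'profiles_map[exact]': first-match lookup in the association list (dict keys are unique)
def pvLookupA (m : List (String × List (String × String))) (k : String) : Option (List (String × String)) :=
  match m with
  | [] => none
  | (name, cred) :: rest => if name == k then some cred else pvLookupA rest k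

-- the match condition both Pythons use: name.startswith(f"{provider}:") or str(cred.get("provider","")).lower() == provider
def pvMatch (name : String) (cred : List (String × String)) (provider : String) : Bool :=
  PySem.Str.startswith name (provider ++ ":")
    || PySem.Str.lower (PySem.Dict.getD (PySem.Dict.mk cred) "provider" "") == provider

-- A's for-loop: first entry satisfying the match condition
def pvScanA (m : List (String × List (String × String))) (provider : String) : String × (List (String × String)) :=
  match m with
  | [] => ("", [])
  | (name, cred) :: rest =>
    if pvMatch name cred provider then (name, cred)
    else pvScanA rest provider

def find_provider_profile_py (profiles_map : List (String × List (String × String))) (provider : String) : String × (List (String × String)) :=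
  let exact := provider ++ ":default"
  match pvLookupA profiles_map exact with
  | some cred => (exact, cred)
  | none => pvScanA profiles_map provider

-- ===== PORT B =====
-- single pass: return on the exact key, else remember the first general match in 'fallback'
def pvScanB (m : List (String × List (String × String))) (provider exact prefix_ : String)
    (fallback : Option (String × List (String × String))) : String × (List (String × String)) :=
  match m with
  | [] => fallback.getD ("", [])
  | (name, cred) :: rest =>
    if name == exact then (name, cred)
    else if fallback.isNone
        && (PySem.Str.startswith name prefix_
            || PySem.Str.lower (PySem.Dict.getD (PySem.Dict.mk cred) "provider" "") == provider) then
      pvScanB rest provider exact prefix_ (some (name, cred))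
    else pvScanB rest provider exact prefix_ fallback

def find_provider_profile_py_alt (profiles_map : List (String × List (String × String))) (provider : String) : String × (List (String × String)) :=
  pvScanB profiles_map provider (provider ++ ":default") (provider ++ ":") none

-- ===== PRECONDITION & SPEC =====
def Spec_find_provider_profile_py (profiles_map : List (String × List (String × String))) (provider : String) (out : String × (List (String × String))) : Prop := out = find_provider_profile_py_alt profiles_map provider
instance (profiles_map : List (String × List (String × String))) (provider : String) (out : String × (List (String × String))) : Decidable (Spec_find_provider_profile_py profiles_map provider out) := by unfold Spec_find_provider_profile_py; infer_instance

-- ===== CLAIM (what is proved, stated in full; the proofs are below) =====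
def Claim_equal_find_provider_profile_py : Prop := ∀ (profiles_map : List (String × List (String × String))) (provider : String), Dom_find_provider_profile_py profiles_map provider → Spec_find_provider_profile_py profiles_map provider (find_provider_profile_py profiles_map provider)

-- ===== LEMMAS AND PROOFS =====

-- B's loop, run with fallback fb, equals: A's pre-lookup if it hits, else fb if set, else A's scan.
theorem pvScanB_eq (provider : String) :
    ∀ (m : List (String × List (String × String))) (fb : Option (String × List (String × String))),
      pvScanB m provider (provider ++ ":default") (provider ++ ":") fb =
        match pvLookupA m (provider ++ ":default") with
        | some cred => (provider ++ ":default", cred)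
        | none => match fb with
                  | some x => x
                  | none => pvScanA m provider := by
  intro m
  induction m with
  | nil => intro fb; cases fb <;> simp [pvScanB, pvLookupA, pvScanA]
  | cons hd tl ih =>
    intro fb
    obtain ⟨name, cred⟩ := hd
    have hBcond : (PySem.Str.startswith name (provider ++ ":")
        || PySem.Str.lower (PySem.Dict.getD (PySem.Dict.mk cred) "provider" "") == provider)
        = pvMatch name cred provider := rfl
    by_cases hx : name == (provider ++ ":default")
    · have hx' : name = provider ++ ":default" := by simpa using hx
      subst hx'
      simp [pvScanB, pvLookupA]
    · simp only [pvScanB, pvLookupA, hBcond, if_neg hx]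
      by_cases hm : (fb.isNone && pvMatch name cred provider) = true
      · have hfb : fb = none := by cases fb <;> simp_all
        have hmatch : pvMatch name cred provider = true := by simp_all
        rw [if_pos hm, ih (some (name, cred))]
        cases h : pvLookupA tl (provider ++ ":default") <;>
          simp only [pvScanA, hfb, hmatch, if_true]
      · rw [if_neg hm, ih fb]
        cases h : pvLookupA tl (provider ++ ":default")
        · cases fb with
          | some x => rfl
          | none =>
            have hmatch : pvMatch name cred provider = false := by simp_all
            simp only [pvScanA, hmatch, Bool.false_eq_true, if_false]
        · rfl

-- ===== VERDICT (by name: the statement is the Claim_ definition above) =====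
theorem find_provider_profile_py_spec : Claim_equal_find_provider_profile_py := by
  intro m provider _
  unfold Spec_find_provider_profile_py find_provider_profile_py find_provider_profile_py_alt
  rw [pvScanB_eq]
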